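-- pv_equiv track=rewrite | github.com/GavrikGal/StepikMathPracticum | Math/1.py | get_step_count
-- ===== SOURCE A (Python) =====
-- from typing import List
--
-- def get_step_count(data: List[int]):
--     m = 0
--     equal = False
--     while not equal:
--         for elem in data[1:]:
--             if data[0] == elem:
--                 equal = True
--             else:
--                 equal = False
--                 break
--         if equal:
--             break
--
--         data.sort()
--         data[0] += 1
--         data[1] += 1
--         m += 1
--
--     n = data[0]
--     return m, n
-- ===== SOURCE B (Python) =====
-- def get_step_count(data):
--     k = len(data)
--     s = sum(data)
--     lo = min(data)
--     hi = max(data)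
--     if lo == hi:
--         return 0, data[0]
--     n = max(hi, -((2 * lo - s) // (k - 2)))
--     if (k * n - s) % 2:
--         n += 1
--     return (k * n - s) // 2, n
-- ===== Notes on version B (the rewrite author's own statement) =====
-- stated objective: faster
-- what changed: A simulates the process step by step (re-sorting the list and incrementing the two smallest elements until all are equal); B computes the answer in closed form in one pass: n = max(max(data), ceil((S-2*min(data))/(k-2))) bumped by 1 if k*n-S is odd, and m = (k*n-S)//2.
import Mathlib
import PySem

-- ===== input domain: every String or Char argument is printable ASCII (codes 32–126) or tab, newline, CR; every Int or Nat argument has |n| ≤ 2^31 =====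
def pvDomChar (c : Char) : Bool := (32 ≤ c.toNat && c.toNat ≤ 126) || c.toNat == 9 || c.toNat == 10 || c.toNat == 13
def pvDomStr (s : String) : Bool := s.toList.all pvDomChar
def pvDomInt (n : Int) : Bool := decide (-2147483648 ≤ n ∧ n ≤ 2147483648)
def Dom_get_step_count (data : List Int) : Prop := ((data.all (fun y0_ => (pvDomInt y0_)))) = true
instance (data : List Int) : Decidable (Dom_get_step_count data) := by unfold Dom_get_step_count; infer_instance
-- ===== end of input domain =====

-- B replaces A's simulate-until-equal loop (repeatedly sort and bump the two smallest)
-- by the closed form n = bump(max(max(data), ceil((S-2*min)/(k-2)))), m = (k*n-S)//2; return value only: A sorts `data` in place, B does not mutate.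


-- ===== PORT A =====
-- the inner `for elem in data[1:]` loop with its `equal` flag
def pvEqLoop (head : Int) : List Int → Bool → Bool
  | [], equal => equal
  | e :: rs, _ => if head == e then pvEqLoop head rs true else false

-- the `while not equal` loop; `fuel` is only a totality guard (pvFuelA below is
-- proved sufficient on every input satisfying Pre_); on a fuel-out, or on a list
-- shorter than 2 (where Python raises IndexError, excluded by Pre_), it returns the current state
def pvLoopA : Nat → List Int → Int → Int × Int
  | 0, data, m => (m, (PySem.List.pyGet? data 0).getD 0)
  | fuel + 1, data, m =>
    let head := (PySem.List.pyGet? data 0).getD 0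
    if pvEqLoop head (data.drop 1) false then (m, head)
    else
      match PySem.List.sorted data (fun x => x) false with
      | d0 :: d1 :: rest => pvLoopA fuel ((d0 + 1) :: (d1 + 1) :: rest) (m + 1)
      | _ => (m, head)

-- an upper bound on the number of loop iterations A performs (totality guard only)
def pvFuelA (data : List Int) : Nat :=
  let k : Int := data.length
  let s := data.sum
  let lo := (PySem.List.min? data (fun x => x)).getD 0
  let hi := (PySem.List.max? data (fun x => x)).getD 0
  (k * (max hi (-(PySem.Int.floordiv (2 * lo - s) (k - 2))) + 1) - s).toNat + 1

def get_step_count (data : List Int) : Int × Int :=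
  pvLoopA (pvFuelA data) data 0

-- ===== PORT B =====
def get_step_count_alt (data : List Int) : Int × Int :=
  let k : Int := data.length
  let s := data.sum
  let lo := (PySem.List.min? data (fun x => x)).getD 0
  let hi := (PySem.List.max? data (fun x => x)).getD 0
  if lo == hi then (0, (PySem.List.pyGet? data 0).getD 0)
  else
    let n0 := max hi (-(PySem.Int.floordiv (2 * lo - s) (k - 2)))
    let n := if PySem.Int.mod (k * n0 - s) 2 ≠ 0 then n0 + 1 else n0
    (PySem.Int.floordiv (k * n - s) 2, n)

-- ===== PRECONDITION & SPEC =====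
-- Pre_ excludes exactly the inputs on which A does not return: lists of length < 2
-- (IndexError), length-2 lists with distinct elements and even-length lists with odd
-- sum (on both of those the while loop never terminates).
def Pre_get_step_count (data : List Int) : Prop :=
  2 ≤ data.length ∧ (data.length = 2 → ∀ x ∈ data, ∀ y ∈ data, x = y) ∧
    (data.length % 2 = 0 → data.sum % 2 = 0)
instance (data : List Int) : Decidable (Pre_get_step_count data) := by
  unfold Pre_get_step_count; infer_instance

def pvWitness_get_step_count : List Int := [1, 2, 3]

def Spec_get_step_count (data : List Int) (out : Int × Int) : Prop := out = get_step_count_alt data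
instance (data : List Int) (out : Int × Int) : Decidable (Spec_get_step_count data out) := by unfold Spec_get_step_count; infer_instance

-- ===== CLAIM (what is proved, stated in full; the proofs are below) =====
def Claim_equal_get_step_count : Prop := ∀ (data : List Int), Dom_get_step_count data → Pre_get_step_count data → Spec_get_step_count data (get_step_count data)

-- ===== LEMMAS AND PROOFS =====

-- value of min(l) / max(l) for nonempty l
def pvMin (l : List Int) : Int := (PySem.List.min? l (fun x => x)).getD 0
def pvMax (l : List Int) : Int := (PySem.List.max? l (fun x => x)).getD 0

lemma pvMin_mem {l : List Int} (h : l ≠ []) : pvMin l ∈ l := by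
  obtain ⟨m, hm⟩ := Option.ne_none_iff_exists'.mp
    (fun e => h ((PySem.List.min?_eq_none_iff l (fun x : Int => x)).mp e))
  rw [pvMin, hm]; exact PySem.List.min?_mem hm

lemma pvMin_le {l : List Int} (h : l ≠ []) : ∀ y ∈ l, pvMin l ≤ y := by
  obtain ⟨m, hm⟩ := Option.ne_none_iff_exists'.mp
    (fun e => h ((PySem.List.min?_eq_none_iff l (fun x : Int => x)).mp e))
  rw [pvMin, hm]; exact PySem.List.min?_isMin hm

lemma pvMax_mem {l : List Int} (h : l ≠ []) : pvMax l ∈ l := by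
  obtain ⟨m, hm⟩ := Option.ne_none_iff_exists'.mp
    (fun e => h ((PySem.List.max?_eq_none_iff l (fun x : Int => x)).mp e))
  rw [pvMax, hm]; exact PySem.List.max?_mem hm

lemma pvMax_ge {l : List Int} (h : l ≠ []) : ∀ y ∈ l, y ≤ pvMax l := by
  obtain ⟨m, hm⟩ := Option.ne_none_iff_exists'.mp
    (fun e => h ((PySem.List.max?_eq_none_iff l (fun x : Int => x)).mp e))
  rw [pvMax, hm]; exact PySem.List.max?_isMax hm

lemma pvMin_eq {l : List Int} {v : Int} (h : l ≠ []) (hv : v ∈ l) (hb : ∀ y ∈ l, v ≤ y) :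
    pvMin l = v := le_antisymm (pvMin_le h v hv) (hb _ (pvMin_mem h))

lemma pvMax_eq {l : List Int} {v : Int} (h : l ≠ []) (hv : v ∈ l) (hb : ∀ y ∈ l, y ≤ v) :
    pvMax l = v := le_antisymm (hb _ (pvMax_mem h)) (pvMax_ge h v hv)

lemma pvMin_perm {l₁ l₂ : List Int} (hp : l₁.Perm l₂) (h : l₁ ≠ []) : pvMin l₁ = pvMin l₂ := by
  have h₂ : l₂ ≠ [] := by intro e; exact h (List.Perm.eq_nil (e ▸ hp))
  exact pvMin_eq h (hp.mem_iff.mpr (pvMin_mem h₂)) (fun y hy => pvMin_le h₂ y (hp.mem_iff.mp hy))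

lemma pvMax_perm {l₁ l₂ : List Int} (hp : l₁.Perm l₂) (h : l₁ ≠ []) : pvMax l₁ = pvMax l₂ := by
  have h₂ : l₂ ≠ [] := by intro e; exact h (List.Perm.eq_nil (e ▸ hp))
  exact pvMax_eq h (hp.mem_iff.mpr (pvMax_mem h₂)) (fun y hy => pvMax_ge h₂ y (hp.mem_iff.mp hy))

-- the closed-form target value (pvN) and feasibility of a common final value n
def pvN (k s lo hi : Int) : Int :=
  if PySem.Int.mod (k * (max hi (-(PySem.Int.floordiv (2 * lo - s) (k - 2)))) - s) 2 ≠ 0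
  then max hi (-(PySem.Int.floordiv (2 * lo - s) (k - 2))) + 1
  else max hi (-(PySem.Int.floordiv (2 * lo - s) (k - 2)))

def pvFeas (k s lo hi n : Int) : Prop := hi ≤ n ∧ s - 2 * lo ≤ (k - 2) * n ∧ (k * n - s) % 2 = 0

-- B's computation, rephrased with pvMin/pvMax/pvN (definitional)
lemma alt_def (l : List Int) : get_step_count_alt l =
    (if pvMin l == pvMax l then (0, (PySem.List.pyGet? l 0).getD 0)
     else (PySem.Int.floordiv ((l.length : Int) * pvN l.length l.sum (pvMin l) (pvMax l) - l.sum) 2,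
           pvN l.length l.sum (pvMin l) (pvMax l))) := rfl

lemma ceil_spec {k s lo : Int} (hk : 3 ≤ k) :
    ((-(PySem.Int.floordiv (2 * lo - s) (k - 2))) - 1) * (k - 2) < s - 2 * lo ∧
      s - 2 * lo ≤ (-(PySem.Int.floordiv (2 * lo - s) (k - 2))) * (k - 2) :=
  (PySem.Int.neg_floordiv_neg_eq_iff_of_pos
    (a := s - 2 * lo) (b := k - 2) (q := -(PySem.Int.floordiv (2 * lo - s) (k - 2)))
    (by omega)).mp (by rw [show -(s - 2 * lo) = 2 * lo - s by ring])

lemma mod2_mul {k n : Int} (hk : k % 2 = 0) : (k * n) % 2 = 0 := by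
  rw [Int.mul_emod, hk]; simp

lemma pvN_feas {k s lo hi : Int} (hk : 3 ≤ k)
    (hEv : k % 2 = 0 → s % 2 = 0) : pvFeas k s lo hi (pvN k s lo hi) := by
  unfold pvN pvFeas
  obtain ⟨h1, h2⟩ := ceil_spec (s := s) (lo := lo) (k := k) hk
  set c := -(PySem.Int.floordiv (2 * lo - s) (k - 2)) with hc
  set n0 := max hi c with hn0
  have hhi : hi ≤ n0 := le_max_left _ _
  have hcn : c ≤ n0 := le_max_right _ _
  have hceil : s - 2 * lo ≤ (k - 2) * n0 := by
    calc s - 2 * lo ≤ c * (k - 2) := h2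
    _ ≤ (k - 2) * n0 := by rw [mul_comm]; exact mul_le_mul_of_nonneg_left hcn (by omega)
  have hmod : PySem.Int.mod (k * n0 - s) 2 = (k * n0 - s) % 2 :=
    PySem.Int.mod_eq_emod_of_pos (by norm_num)
  rw [hmod]
  by_cases hp : (k * n0 - s) % 2 = 0
  · simp only [hp, ne_eq, not_true_eq_false, if_false]
    exact ⟨hhi, hceil, trivial⟩
  · simp only [hp, ne_eq, not_false_eq_true, if_true]
    refine ⟨by omega, ?_, ?_⟩
    · have : (k - 2) * n0 ≤ (k - 2) * (n0 + 1) := by nlinarith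
      omega
    · have hko : k % 2 = 1 := by
        rcases Int.emod_two_eq k with h | h
        · exact absurd (by have := mod2_mul (n := n0) h; have hs := hEv h; omega) hp
        · exact h
      have h1' : (k * (n0 + 1)) % 2 = (k * n0 + k) % 2 := by ring_nf
      have h2' : (k * n0 + k) % 2 = ((k * n0) % 2 + k % 2) % 2 := by rw [Int.add_emod]
      omega

lemma pvN_min {k s lo hi n : Int} (hk : 3 ≤ k) (hn : pvFeas k s lo hi n) : pvN k s lo hi ≤ n := by
  unfold pvN
  obtain ⟨h1, h2⟩ := ceil_spec (s := s) (lo := lo) (k := k) hk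
  set c := -(PySem.Int.floordiv (2 * lo - s) (k - 2)) with hc
  set n0 := max hi c with hn0
  obtain ⟨ha, hb, hpar⟩ := hn
  have hcle : c ≤ n := by
    by_contra hlt
    rw [not_le] at hlt
    have : (k - 2) * n ≤ (c - 1) * (k - 2) := by nlinarith
    omega
  have hn0le : n0 ≤ n := by omega
  have hmod : PySem.Int.mod (k * n0 - s) 2 = (k * n0 - s) % 2 :=
    PySem.Int.mod_eq_emod_of_pos (by norm_num)
  rw [hmod]
  by_cases hp : (k * n0 - s) % 2 = 0
  · simp only [hp, ne_eq, not_true_eq_false, if_false]; exact hn0le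
  · simp only [hp, ne_eq, not_false_eq_true, if_true]
    rcases eq_or_lt_of_le hn0le with he | hlt
    · exact absurd (he ▸ hpar) hp
    · omega

-- kN - s is nonnegative (indeed ≥ 2(hi-lo)) and even
lemma kN_lower {k s lo hi : Int} (hk : 3 ≤ k) (hEv : k % 2 = 0 → s % 2 = 0) (hlohi : lo ≤ hi) :
    2 * (hi - lo) ≤ k * pvN k s lo hi - s ∧ (k * pvN k s lo hi - s) % 2 = 0 := by
  obtain ⟨h1, h2, h3⟩ := pvN_feas (lo := lo) (hi := hi) hk hEv
  set N := pvN k s lo hi with hN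
  have hr : k * N - (k - 2) * N = 2 * N := by ring
  constructor
  · have : lo ≤ N := le_trans hlohi h1
    omega
  · exact h3

-- N is bounded by the unbumped candidate + 1 (for the fuel bound)
lemma pvN_le_n0_succ (k s lo hi : Int) :
    pvN k s lo hi ≤ max hi (-(PySem.Int.floordiv (2 * lo - s) (k - 2))) + 1 := by
  unfold pvN; split <;> omega

-- the `equal` flag after the for loop
lemma pvEqLoop_true (head : Int) : ∀ rs : List Int, pvEqLoop head rs true = rs.all (· == head) := by
  intro rs; induction rs with
  | nil => rfl
  | cons e rs ih =>
    simp only [pvEqLoop, List.all_cons, ih]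
    by_cases he : head = e <;> simp [he, beq_iff_eq]
    omega

lemma pvEqLoop_char (head : Int) (t : List Int) :
    pvEqLoop head t false = true ↔ t ≠ [] ∧ ∀ e ∈ t, e = head := by
  cases t with
  | nil => simp [pvEqLoop]
  | cons e rs =>
    simp only [pvEqLoop, pvEqLoop_true]
    by_cases he : head = e
    · simp only [he, beq_self_eq_true, if_true, List.all_eq_true, beq_iff_eq]
      constructor
      · intro hall
        exact ⟨List.cons_ne_nil _ _, by
          intro x hx; rcases List.mem_cons.mp hx with h | h
          · omega
          · exact hall x h⟩
      · intro ⟨_, h2⟩ x hx; exact h2 x (List.mem_cons_of_mem _ hx)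
    · have hbe : (head == e) = false := by simp [he]
      simp only [hbe]
      constructor
      · intro h; exact absurd h (by simp)
      · intro ⟨_, h2⟩
        exact absurd (h2 e List.mem_cons_self) (fun hh => he hh.symm)

lemma pyGet0 (x : Int) (t : List Int) : (PySem.List.pyGet? (x :: t) 0).getD 0 = x := by
  simp [pysem]

-- B's value on a list whose tail equals its head
lemma alt_allEq (x : Int) (tail : List Int) (h : ∀ e ∈ tail, e = x) :
    get_step_count_alt (x :: tail) = (0, x) := by
  have hne : (x :: tail) ≠ [] := List.cons_ne_nil _ _
  have hmem : ∀ y ∈ x :: tail, y = x := by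
    intro y hy; rcases List.mem_cons.mp hy with h' | h'
    · exact h'
    · exact h y h'
  have hmin : pvMin (x :: tail) = x :=
    pvMin_eq hne List.mem_cons_self (fun y hy => le_of_eq (hmem y hy).symm)
  have hmax : pvMax (x :: tail) = x :=
    pvMax_eq hne List.mem_cons_self (fun y hy => le_of_eq (hmem y hy))
  rw [alt_def, hmin, hmax]
  simp

-- B's value, as the closed form, on any list of length ≥ 3 (also when min = max)
lemma pvN_allEq {k lo : Int} (hk3 : 3 ≤ k) : pvN k (k * lo) lo lo = lo := by
  unfold pvN
  have hc : -(PySem.Int.floordiv (2 * lo - k * lo) (k - 2)) = lo := by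
    rw [show 2 * lo - k * lo = -((k - 2) * lo) by ring]
    exact (PySem.Int.neg_floordiv_neg_eq_iff_of_pos (by omega)).mpr ⟨by nlinarith, by nlinarith⟩
  rw [hc, max_self, show k * lo - k * lo = 0 by ring]
  norm_num [show PySem.Int.mod 0 2 = 0 from by decide]

-- B's value, as the closed form, on any list of length ≥ 3 (also when min = max)
lemma alt_formula (l : List Int) (hk : 3 ≤ l.length) :
    get_step_count_alt l =
      (PySem.Int.floordiv ((l.length : Int) * pvN l.length l.sum (pvMin l) (pvMax l) - l.sum) 2,
        pvN l.length l.sum (pvMin l) (pvMax l)) := by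
  rw [alt_def]
  by_cases he : pvMin l = pvMax l
  · have hnil : l ≠ [] := by intro e; rw [e] at hk; simp at hk
    obtain ⟨x, t, rfl⟩ := List.exists_cons_of_ne_nil hnil
    have hk3 : (3 : Int) ≤ ((x :: t).length : Int) := by exact_mod_cast hk
    have hmem : ∀ y ∈ x :: t, y = pvMin (x :: t) := by
      intro y hy
      have h1 := pvMin_le hnil y hy
      have h2 := pvMax_ge hnil y hy
      omega
    have hx : x = pvMin (x :: t) := hmem x List.mem_cons_self
    have hsum : (x :: t).sum = ((x :: t).length : Int) * pvMin (x :: t) := by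
      rw [List.sum_eq_card_nsmul _ _ hmem]; simp [mul_comm]
    rw [← he, hsum, pvN_allEq hk3, show ((x :: t).length : Int) * pvMin (x :: t)
        - ((x :: t).length : Int) * pvMin (x :: t) = 0 by ring,
      show PySem.Int.floordiv 0 2 = 0 from by decide]
    simp only [beq_self_eq_true, if_true, pyGet0, ← hx]
  · have hbe : (pvMin l == pvMax l) = false := by simp [he]
    rw [hbe]
    simp

-- ∑ of a list bounded above; pulled out for the step lemma
lemma sum_le_bound {M : Int} (t : List Int) (hub : ∀ x ∈ t, x ≤ M) (ht : t ≠ []) :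
    t.sum ≤ pvMin t + ((t.length : Int) - 1) * M := by
  obtain ⟨t₁, t₂, hsplit⟩ := List.append_of_mem (pvMin_mem ht)
  have h1 : t₁.sum ≤ (t₁.length : Int) * M := by
    have := List.sum_le_card_nsmul t₁ M (fun x hx => hub x (by rw [hsplit]; exact List.mem_append_left _ hx))
    simpa [nsmul_eq_mul] using this
  have h2 : t₂.sum ≤ (t₂.length : Int) * M := by
    have := List.sum_le_card_nsmul t₂ M (fun x hx => hub x (by
      rw [hsplit]; exact List.mem_append_right _ (List.mem_cons_of_mem _ hx)))
    simpa [nsmul_eq_mul] using this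
  have hs : t.sum = t₁.sum + pvMin t + t₂.sum := by
    conv_lhs => rw [hsplit]
    rw [List.sum_append, List.sum_cons]; ring
  have hl : (t.length : Int) = t₁.length + t₂.length + 1 := by
    conv_lhs => rw [hsplit]
    push_cast [List.length_append, List.length_cons]; ring
  rw [hs, hl]
  nlinarith

lemma sum_all_eq {M : Int} (t : List Int) (h : ∀ x ∈ t, x = M) :
    t.sum = (t.length : Int) * M := by
  rw [List.sum_eq_card_nsmul _ _ h]; simp [mul_comm]

-- the arithmetic heart: one bump step preserves the target value pvN
lemma pvN_step {k s d0 d1 mlo mhi : Int} (hk : 3 ≤ k)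
    (h01 : d0 ≤ d1) (h1m : d1 ≤ mlo) (hmm : mlo ≤ mhi) (hne : d0 < mhi)
    (hsle : s ≤ d0 + d1 + mlo + (k - 3) * mhi)
    (hseq : mlo = mhi → s = d0 + d1 + (k - 2) * mhi)
    (hEv : k % 2 = 0 → s % 2 = 0) :
    pvN k (s + 2) (min (d0 + 1) mlo) (max (d1 + 1) mhi) = pvN k s d0 mhi := by
  have hEv2 : k % 2 = 0 → (s + 2) % 2 = 0 := by intro h; have := hEv h; omega
  obtain ⟨hf1, hf2, hf3⟩ := pvN_feas (s := s) (lo := d0) (hi := mhi) hk hEv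
  set N := pvN k s d0 mhi with hN
  have hmhiN : mhi ≤ N := hf1
  -- N exceeds d1
  have hd1N : d1 + 1 ≤ N := by
    rcases lt_or_ge d1 mhi with h | h
    · omega
    · -- d1 = mlo = mhi; strictness comes from the feasibility inequality
      have hml : mlo = mhi := by omega
      have hs' := hseq hml
      have : (k - 2) * mhi < (k - 2) * N := by nlinarith
      have : mhi < N := lt_of_mul_lt_mul_left this (by omega)
      omega
  -- N satisfies the new deficit inequality
  have hdef : (s + 2) - 2 * min (d0 + 1) mlo ≤ (k - 2) * N := by
    rcases le_or_gt (d0 + 1) mlo with h | h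
    · rw [min_eq_left h]; omega
    · -- mlo = d0 = d1: at least three minima
      have hml : mlo = d0 := by omega
      have hmin : min (d0 + 1) mlo = d0 := by omega
      rw [hmin]
      have hkm : (k - 3) * mhi ≤ (k - 3) * N := mul_le_mul_of_nonneg_left hmhiN (by omega)
      have hs3 : s ≤ 3 * d0 + (k - 3) * N := by omega
      have hr1 : k * N - (k - 3) * N = 3 * N := by ring
      have hr2 : (k - 2) * N = k * N - 2 * N := by ring
      have hD : d0 + 1 ≤ N := by omega
      -- X := k*N - s ≥ 3*(N - d0), X even, N - d0 ≥ 1 ⟹ X ≥ 2*(N - d0) + 2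
      omega
  have hfeasN : pvFeas k (s + 2) (min (d0 + 1) mlo) (max (d1 + 1) mhi) N :=
    ⟨by omega, hdef, by omega⟩
  have h1 : pvN k (s + 2) (min (d0 + 1) mlo) (max (d1 + 1) mhi) ≤ N := pvN_min hk hfeasN
  -- conversely, the new optimum is feasible for the old parameters
  obtain ⟨hg1, hg2, hg3⟩ := pvN_feas (s := s + 2) (lo := min (d0 + 1) mlo) (hi := max (d1 + 1) mhi) hk hEv2
  set N' := pvN k (s + 2) (min (d0 + 1) mlo) (max (d1 + 1) mhi) with hN'
  have hfeasN' : pvFeas k s d0 mhi N' := by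
    refine ⟨by omega, ?_, by omega⟩
    have : min (d0 + 1) mlo ≤ d0 + 1 := min_le_left _ _
    omega
  have h2 : N ≤ N' := pvN_min hk hfeasN'
  omega

-- one loop iteration of A lowers B's step count by one and keeps B's target value
lemma step_lemma (data : List Int) (d0 d1 : Int) (t : List Int)
    (hs : PySem.List.sorted data (fun x => x) false = d0 :: d1 :: t) (ht : t ≠ [])
    (hEv : (data.length : Int) % 2 = 0 → data.sum % 2 = 0)
    (hne : pvMin data < pvMax data) :
    get_step_count_alt ((d0 + 1) :: (d1 + 1) :: t) =
      ((get_step_count_alt data).1 - 1, (get_step_count_alt data).2) := by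
  have hperm : (d0 :: d1 :: t).Perm data := by
    rw [← hs]; exact PySem.List.sorted_perm data (fun x => x) false
  have hpw : (d0 :: d1 :: t).Pairwise (· ≤ ·) := by
    have := PySem.List.sorted_pairwise data (fun x : Int => x)
    rw [hs] at this; exact this
  have hdne : data ≠ [] := by
    intro e; rw [e] at hperm; exact (List.cons_ne_nil _ _) hperm.eq_nil
  obtain ⟨h0, hpw1⟩ := List.pairwise_cons.mp hpw
  obtain ⟨h1t, _⟩ := List.pairwise_cons.mp hpw1
  have h01 : d0 ≤ d1 := h0 d1 List.mem_cons_self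
  have h0t : ∀ y ∈ t, d0 ≤ y := fun y hy => h0 y (List.mem_cons_of_mem _ hy)
  set mlo := pvMin t with hmlo
  set mhi := pvMax t with hmhi
  have hmlomem := pvMin_mem ht
  have hmhimem := pvMax_mem ht
  have h1m : d1 ≤ mlo := h1t _ hmlomem
  have hmm : mlo ≤ mhi := pvMin_le ht _ hmhimem
  have klen : (data.length : Int) = (t.length : Int) + 2 := by
    rw [← hperm.length_eq]; push_cast [List.length_cons]; ring
  have hk3 : 3 ≤ (data.length : Int) := by
    have : t.length ≠ 0 := fun e => ht (List.length_eq_zero_iff.mp e)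
    omega
  have hsum : data.sum = d0 + d1 + t.sum := by
    rw [← hperm.sum_eq, List.sum_cons, List.sum_cons]; ring
  -- min and max of the original list
  have hlo : pvMin data = d0 := by
    rw [← pvMin_perm hperm (List.cons_ne_nil _ _)]
    exact pvMin_eq (List.cons_ne_nil _ _) List.mem_cons_self (by
      intro y hy; rcases List.mem_cons.mp hy with h | h
      · omega
      · rcases List.mem_cons.mp h with h' | h'
        · omega
        · exact h0t y h')
  have hhi : pvMax data = mhi := by
    rw [← pvMax_perm hperm (List.cons_ne_nil _ _)]
    exact pvMax_eq (List.cons_ne_nil _ _)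
      (List.mem_cons_of_mem _ (List.mem_cons_of_mem _ hmhimem)) (by
      intro y hy; rcases List.mem_cons.mp hy with h | h
      · omega
      · rcases List.mem_cons.mp h with h' | h'
        · omega
        · exact pvMax_ge ht y h')
  have hned : d0 < mhi := by rw [hlo, hhi] at hne; exact hne
  -- min, max, sum, length of the bumped list
  have hlou : pvMin ((d0 + 1) :: (d1 + 1) :: t) = min (d0 + 1) mlo := by
    refine pvMin_eq (List.cons_ne_nil _ _) ?_ ?_
    · rcases le_total (d0 + 1) mlo with h | h
      · rw [min_eq_left h]; exact List.mem_cons_self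
      · rw [min_eq_right h]; exact List.mem_cons_of_mem _ (List.mem_cons_of_mem _ hmlomem)
    · intro y hy; rcases List.mem_cons.mp hy with h | h
      · have : min (d0 + 1) mlo ≤ d0 + 1 := min_le_left _ _; omega
      · rcases List.mem_cons.mp h with h' | h'
        · have : min (d0 + 1) mlo ≤ d0 + 1 := min_le_left _ _; omega
        · have := pvMin_le ht y h'
          have : min (d0 + 1) mlo ≤ mlo := min_le_right _ _; omega
  have hhiu : pvMax ((d0 + 1) :: (d1 + 1) :: t) = max (d1 + 1) mhi := by
    refine pvMax_eq (List.cons_ne_nil _ _) ?_ ?_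
    · rcases le_total (d1 + 1) mhi with h | h
      · rw [max_eq_right h]; exact List.mem_cons_of_mem _ (List.mem_cons_of_mem _ hmhimem)
      · rw [max_eq_left h]; exact List.mem_cons_of_mem _ List.mem_cons_self
    · intro y hy; rcases List.mem_cons.mp hy with h | h
      · have : d1 + 1 ≤ max (d1 + 1) mhi := le_max_left _ _; omega
      · rcases List.mem_cons.mp h with h' | h'
        · have : d1 + 1 ≤ max (d1 + 1) mhi := le_max_left _ _; omega
        · have := pvMax_ge ht y h'
          have : mhi ≤ max (d1 + 1) mhi := le_max_right _ _; omega
  have hsumu : ((d0 + 1) :: (d1 + 1) :: t).sum = data.sum + 2 := by rw [hsum]; simp; ring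
  have hlenu : (((d0 + 1) :: (d1 + 1) :: t).length : Int) = (data.length : Int) := by
    push_cast [List.length_cons]; omega
  -- the sum bounds for pvN_step
  have hsle : data.sum ≤ d0 + d1 + mlo + ((data.length : Int) - 3) * mhi := by
    have hb := sum_le_bound t (pvMax_ge ht) ht
    rw [← hmlo, ← hmhi] at hb
    have hr : ((data.length : Int) - 3) * mhi = ((t.length : Int) - 1) * mhi := by rw [klen]; ring
    rw [hsum, hr]; omega
  have hseq : mlo = mhi → data.sum = d0 + d1 + ((data.length : Int) - 2) * mhi := by
    intro h
    have hall : ∀ x ∈ t, x = mhi := by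
      intro x hx
      have := pvMin_le ht x hx
      have := pvMax_ge ht x hx
      omega
    have hv := sum_all_eq t hall
    have hr : ((data.length : Int) - 2) * mhi = (t.length : Int) * mhi := by rw [klen]; ring
    rw [hsum, hv, hr]
  have hstep := pvN_step (s := data.sum) hk3 h01 h1m hmm hned hsle hseq hEv
  -- assemble via the closed form on both lists
  rw [alt_formula data (by exact_mod_cast hk3),
      alt_formula ((d0 + 1) :: (d1 + 1) :: t) (by
        have := hperm.length_eq; simp at this; omega)]
  rw [hlou, hhiu, hsumu, hlo, hhi]
  have hlen' : ((((d0 + 1) :: (d1 + 1) :: t).length : Nat) : Int) = (data.length : Int) := hlenu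
  rw [hlen', hstep]
  -- first components: floordiv (kN - (s+2)) 2 = floordiv (kN - s) 2 - 1, using parity
  obtain ⟨_, _, hpar⟩ := pvN_feas (s := data.sum) (lo := d0) (hi := mhi) hk3 hEv
  set N := pvN (data.length : Int) data.sum d0 mhi with hN
  have e1 : PySem.Int.floordiv ((data.length : Int) * N - (data.sum + 2)) 2
      = ((data.length : Int) * N - (data.sum + 2)) / 2 := PySem.Int.floordiv_eq_ediv_of_pos (by norm_num)
  have e2 : PySem.Int.floordiv ((data.length : Int) * N - data.sum) 2
      = ((data.length : Int) * N - data.sum) / 2 := PySem.Int.floordiv_eq_ediv_of_pos (by norm_num)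
  rw [e1, e2]
  refine Prod.ext ?_ rfl
  show ((data.length : Int) * N - (data.sum + 2)) / 2 = ((data.length : Int) * N - data.sum) / 2 - 1
  omega

-- when the elements are not all equal, B reports at least one step
lemma alt_fst_pos (data : List Int) (hk : 3 ≤ data.length)
    (hEv : (data.length : Int) % 2 = 0 → data.sum % 2 = 0)
    (hne : pvMin data < pvMax data) : 1 ≤ (get_step_count_alt data).1 := by
  rw [alt_formula data hk]
  have hk3 : 3 ≤ (data.length : Int) := by exact_mod_cast hk
  obtain ⟨hge, hpar⟩ := kN_lower (s := data.sum) hk3 hEv (le_of_lt hne)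
  have e : PySem.Int.floordiv ((data.length : Int) * pvN (data.length : Int) data.sum (pvMin data) (pvMax data) - data.sum) 2
      = ((data.length : Int) * pvN (data.length : Int) data.sum (pvMin data) (pvMax data) - data.sum) / 2 :=
    PySem.Int.floordiv_eq_ediv_of_pos (by norm_num)
  show 1 ≤ PySem.Int.floordiv _ 2
  rw [e]
  omega

lemma pre_big (data : List Int) (h : Pre_get_step_count data) (hne : pvMin data < pvMax data) :
    3 ≤ data.length := by
  obtain ⟨h2, heq, _⟩ := h
  rcases Nat.lt_or_ge data.length 3 with h | h
  · exfalso
    have hl2 : data.length = 2 := by omega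
    have hd : data ≠ [] := by intro e; rw [e] at h2; simp at h2
    have := heq hl2 _ (pvMin_mem hd) _ (pvMax_mem hd)
    omega
  · exact h

lemma pre_parity (data : List Int) (h : Pre_get_step_count data) :
    (data.length : Int) % 2 = 0 → data.sum % 2 = 0 := by
  obtain ⟨_, _, hp⟩ := h
  intro he
  exact hp (by omega)

lemma master (fuel : Nat) : ∀ (data : List Int) (m : Int), Pre_get_step_count data →
    ((get_step_count_alt data).1).toNat ≤ fuel →
    pvLoopA fuel data m = (m + (get_step_count_alt data).1, (get_step_count_alt data).2) := by
  induction fuel with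
  | zero =>
    intro data m hpre hf
    have hd : data ≠ [] := by intro e; rw [e] at hpre; simp [Pre_get_step_count] at hpre
    rcases eq_or_lt_of_le (pvMin_le hd _ (pvMax_mem hd)) with he | hlt
    · -- all elements equal: B returns (0, head)
      obtain ⟨x, t, rfl⟩ := List.exists_cons_of_ne_nil hd
      have hall : ∀ e ∈ t, e = x := by
        intro e hemem
        have h1 := pvMin_le hd e (List.mem_cons_of_mem _ hemem)
        have h2 := pvMax_ge hd e (List.mem_cons_of_mem _ hemem)
        have h3 := pvMin_le hd x List.mem_cons_self
        have h4 := pvMax_ge hd x List.mem_cons_self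
        omega
      rw [alt_allEq x t hall]
      simp [pvLoopA]
    · exfalso
      have := alt_fst_pos data (pre_big data hpre hlt) (pre_parity data hpre) hlt
      omega
  | succ fuel ih =>
    intro data m hpre hf
    have hd : data ≠ [] := by intro e; rw [e] at hpre; simp [Pre_get_step_count] at hpre
    obtain ⟨x, tail, rfl⟩ := List.exists_cons_of_ne_nil hd
    show (if pvEqLoop ((PySem.List.pyGet? (x :: tail) 0).getD 0) ((x :: tail).drop 1) false
          then (m, (PySem.List.pyGet? (x :: tail) 0).getD 0)
          else match PySem.List.sorted (x :: tail) (fun x => x) false with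
            | d0 :: d1 :: rest => pvLoopA fuel ((d0 + 1) :: (d1 + 1) :: rest) (m + 1)
            | _ => (m, (PySem.List.pyGet? (x :: tail) 0).getD 0)) = _
    rw [pyGet0]
    by_cases hcond : pvEqLoop x tail false = true
    · obtain ⟨_, hall⟩ := (pvEqLoop_char x tail).mp hcond
      rw [alt_allEq x tail hall]
      simp [hcond]
    · rw [List.drop_one, List.tail_cons]
      have hcf : pvEqLoop x tail false = false := by
        cases h : pvEqLoop x tail false
        · rfl
        · exact absurd h hcond
      rw [hcf]
      simp only [Bool.false_eq_true, if_false]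
      -- not all equal: find a distinct element
      have htail : tail ≠ [] := by
        obtain ⟨h2, _, _⟩ := hpre
        intro e; rw [e] at h2; simp at h2
      have hex : ∃ e ∈ tail, e ≠ x := by
        by_contra hno
        rw [not_exists] at hno
        exact hcond ((pvEqLoop_char x tail).mpr ⟨htail, fun e he => by
          by_contra hne; exact (hno e) ⟨he, hne⟩⟩)
      obtain ⟨e, hemem, hene⟩ := hex
      have hne : pvMin (x :: tail) < pvMax (x :: tail) := by
        have h1 := pvMin_le hd e (List.mem_cons_of_mem _ hemem)
        have h2 := pvMax_ge hd e (List.mem_cons_of_mem _ hemem)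
        have h3 := pvMin_le hd x List.mem_cons_self
        have h4 := pvMax_ge hd x List.mem_cons_self
        omega
      have hk3 := pre_big _ hpre hne
      -- decompose the sorted list
      have hslen : (PySem.List.sorted (x :: tail) (fun x => x) false).length = (x :: tail).length :=
        (PySem.List.sorted_perm _ _ _).length_eq
      obtain ⟨d0, d1, t, hs, ht⟩ : ∃ d0 d1 t, PySem.List.sorted (x :: tail) (fun x => x) false
          = d0 :: d1 :: t ∧ t ≠ [] := by
        have hk3' : 3 ≤ (PySem.List.sorted (x :: tail) (fun x => x) false).length := by
          rw [hslen]; exact hk3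
        rcases hsort : PySem.List.sorted (x :: tail) (fun x => x) false with _ | ⟨a, _ | ⟨b, u⟩⟩
        · rw [hsort] at hk3'; simp at hk3'
        · rw [hsort] at hk3'; simp at hk3'
        · refine ⟨a, b, u, rfl, ?_⟩
          rw [hsort] at hk3'
          intro he; rw [he] at hk3'; simp at hk3'
      rw [hs]
      show pvLoopA fuel ((d0 + 1) :: (d1 + 1) :: t) (m + 1) = _
      have hstep := step_lemma (x :: tail) d0 d1 t hs ht (pre_parity _ hpre) hne
      have hpos := alt_fst_pos (x :: tail) hk3 (pre_parity _ hpre) hne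
      -- Pre_ for the bumped list
      have hperm : (d0 :: d1 :: t).Perm (x :: tail) := by
        rw [← hs]; exact PySem.List.sorted_perm _ _ _
      have hlen : ((d0 + 1) :: (d1 + 1) :: t).length = (x :: tail).length := by
        have := hperm.length_eq; simp at this ⊢; omega
      have hsumu : ((d0 + 1) :: (d1 + 1) :: t).sum = (x :: tail).sum + 2 := by
        have := hperm.sum_eq; simp at this ⊢; omega
      have hpre' : Pre_get_step_count ((d0 + 1) :: (d1 + 1) :: t) := by
        obtain ⟨h2, _, hp⟩ := hpre
        refine ⟨by omega, by intro h; rw [hlen] at h; omega, ?_⟩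
        intro hl
        rw [hsumu]
        have := hp (by omega)
        omega
      have hfu : ((get_step_count_alt ((d0 + 1) :: (d1 + 1) :: t)).1).toNat ≤ fuel := by
        rw [hstep]; omega
      rw [ih _ (m + 1) hpre' hfu, hstep]
      refine Prod.ext ?_ rfl
      show m + 1 + ((get_step_count_alt (x :: tail)).1 - 1) = m + (get_step_count_alt (x :: tail)).1
      ring

lemma fuel_enough (data : List Int) (h : Pre_get_step_count data) :
    ((get_step_count_alt data).1).toNat ≤ pvFuelA data := by
  have hd : data ≠ [] := by intro e; rw [e] at h; simp [Pre_get_step_count] at h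
  rcases eq_or_lt_of_le (pvMin_le hd _ (pvMax_mem hd)) with he | hlt
  · -- all equal: B's first component is 0
    obtain ⟨x, t, rfl⟩ := List.exists_cons_of_ne_nil hd
    have hall : ∀ e ∈ t, e = x := by
      intro e hemem
      have h1 := pvMin_le hd e (List.mem_cons_of_mem _ hemem)
      have h2 := pvMax_ge hd e (List.mem_cons_of_mem _ hemem)
      have h3 := pvMin_le hd x List.mem_cons_self
      have h4 := pvMax_ge hd x List.mem_cons_self
      omega
    rw [alt_allEq x t hall]
    simp [pvFuelA]
  · have hk := pre_big data h hlt
    have hk3 : 3 ≤ (data.length : Int) := by exact_mod_cast hk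
    rw [alt_formula data hk]
    obtain ⟨hge, hpar⟩ := kN_lower (s := data.sum) hk3 (pre_parity data h) (le_of_lt hlt)
    have hub := pvN_le_n0_succ (data.length : Int) data.sum (pvMin data) (pvMax data)
    set N := pvN (data.length : Int) data.sum (pvMin data) (pvMax data) with hN
    set n0 := max (pvMax data) (-(PySem.Int.floordiv (2 * pvMin data - data.sum) ((data.length : Int) - 2))) with hn0
    have hkN : (data.length : Int) * N ≤ (data.length : Int) * (n0 + 1) :=
      mul_le_mul_of_nonneg_left hub (by omega)
    have e : PySem.Int.floordiv ((data.length : Int) * N - data.sum) 2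
        = ((data.length : Int) * N - data.sum) / 2 := PySem.Int.floordiv_eq_ediv_of_pos (by norm_num)
    show (PySem.Int.floordiv ((data.length : Int) * N - data.sum) 2).toNat ≤ _
    rw [e]
    show _ ≤ ((data.length : Int) * (n0 + 1) - data.sum).toNat + 1
    omega

-- ===== VERDICT (by name: the statement is the Claim_ definition above) =====
theorem get_step_count_spec : Claim_equal_get_step_count := by
  intro data _ hpre
  show get_step_count data = get_step_count_alt data
  rw [get_step_count, master (pvFuelA data) data 0 hpre (fuel_enough data hpre), zero_add]
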